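-- pv_equiv track=rewrite | github.com/adriandrag18/LeetCodeMarathon | Problems/3907.count-prime-gap-balanced-subarrays.py | primeSubarray
-- ===== SOURCE A (Python) =====
-- from typing import List
--
-- MAX = 5 * 10**4 + 1
--
-- isPrime = [True] * MAX
--
-- def primeSubarray(nums: List[int], k: int) -> int:
--     if isPrime[0]:
--         isPrime[0] = isPrime[1] = False
--         for num in range(2, MAX):
--             if not isPrime[num]:
--                 continue
--             i = 2
--             while i * num < MAX:
--                 isPrime[i * num] = False
--                 i += 1
--
--     n = len(nums)
--
--     arr = []
--     counts = []
--     count = 1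
--     for num in nums:
--         if isPrime[num]:
--             arr.append(num)
--             counts.append(count)
--             count = 1
--         else:
--             count += 1
--     counts.append(count)
--
--     m = len(arr)
--
--     minPrime = float('inf')
--     maxPrime = 0
--     minIndex = maxIndex = -1
--     l, r = 0, 0
--     res = 0
--
--     for r in range(m):
--         el = arr[r]
--         a, b = minIndex, maxIndex
--         if el <= minPrime:
--             minPrime = el
--             minIndex = r
--         if el >= maxPrime:
--             maxPrime = el
--             maxIndex = r
--
--         while r - l + 1 >= 2 and maxPrime - minPrime > k:
--             el = arr[l]
--             if minPrime == el and minIndex == l: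
--                 minPrime = float('inf')
--                 for i in range(l + 1, r + 1):
--                     if arr[i] < minPrime:
--                         minPrime = arr[i]
--                         minIndex = i
--             if maxPrime == el and maxIndex == l:
--                 maxPrime = 0
--                 for i in range(l + 1, r + 1):
--                     if arr[i] > maxPrime:
--                         maxPrime = arr[i]
--                         maxIndex = i
--             l += 1
--
--         if r - l + 1 >= 2:
--             res += sum(counts[l:r]) * counts[r + 1]
--
--     return res
-- ===== SOURCE B (Python) =====
-- from typing import List
--
-- # Same prime sieve as A (the table is shared infrastructure); the algorithmic
-- # change is in the counting: instead of A's stateful sliding window with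
-- # incrementally maintained extrema and O(window) rescans on eviction, B does an
-- # independent backward scan from each right prime endpoint, accumulating the
-- # running min/max and stopping as soon as the gap exceeds k.
-- MAX = 5 * 10**4 + 1
--
-- isPrime = [True] * MAX
--
-- def primeSubarray(nums: List[int], k: int) -> int:
--     if isPrime[0]:
--         isPrime[0] = isPrime[1] = False
--         for num in range(2, MAX):
--             if not isPrime[num]:
--                 continue
--             i = 2
--             while i * num < MAX:
--                 isPrime[i * num] = False
--                 i += 1
--
--     arr = []
--     counts = []
--     count = 1
--     for num in nums:
--         if 0 <= num < MAX and isPrime[num]: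
--             arr.append(num)
--             counts.append(count)
--             count = 1
--         else:
--             count += 1
--     counts.append(count)
--
--     m = len(arr)
--     res = 0
--     for r in range(m):
--         right = counts[r + 1]
--         mn = mx = arr[r]
--         j = r - 1
--         while j >= 0:
--             x = arr[j]
--             if x < mn:
--                 mn = x
--             if x > mx:
--                 mx = x
--             if mx - mn > k:
--                 break
--             res += counts[j] * right
--             j -= 1
--     return res
-- ===== Notes on version B (the rewrite author's own statement) =====
-- stated objective: alternative
-- what changed: Replaces A's stateful sliding window (two pointers with incrementally maintained min/max, O(window) rescans on eviction, and a slice-sum per step) by a stateless backward scan from each right prime endpoint that accumulates the running min/max and stops as soon as max-min exceeds k; the prime sieve table is kept as shared infrastructure.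
-- outside the precondition, e.g. on primeSubarray([3, -49999], 100000): A returns 1, B returns 0; on primeSubarray([100000], 0): A raises IndexError, B returns 0
import Mathlib
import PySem

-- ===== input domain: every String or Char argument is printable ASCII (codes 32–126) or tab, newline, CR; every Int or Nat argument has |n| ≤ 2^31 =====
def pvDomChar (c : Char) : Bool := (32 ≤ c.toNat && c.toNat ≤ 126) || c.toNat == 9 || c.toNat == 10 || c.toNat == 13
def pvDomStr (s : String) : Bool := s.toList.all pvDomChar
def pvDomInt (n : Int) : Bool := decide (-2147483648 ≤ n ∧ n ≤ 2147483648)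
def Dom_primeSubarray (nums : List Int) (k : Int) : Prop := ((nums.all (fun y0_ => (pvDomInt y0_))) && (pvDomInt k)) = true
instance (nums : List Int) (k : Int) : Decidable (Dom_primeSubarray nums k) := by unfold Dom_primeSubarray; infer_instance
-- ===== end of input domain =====

-- B replaces A's stateful sliding window (incremental extrema, rescans on eviction, slice sums)
-- by a stateless backward scan from each right prime endpoint with early break; same cost class,
-- no speed claim. The sieve table is shared infrastructure of both programs.

-- ===== PORT A =====
-- float('inf') as an integer sentinel: strictly above every value reachable on Dom inputs,
-- so every comparison the Python makes against float('inf') is reproduced exactly.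
def pvINF : Int := 4611686018427387904

-- inner `while i * num < MAX: isPrime[i*num] = False; i += 1` (the `2 ≤ num` conjunct only
-- makes the recursion total; every call site has num ≥ 2)
def markLoop (t : Array Bool) (num i : Nat) : Array Bool :=
  if 2 ≤ num ∧ i * num < 50001 then markLoop (t.set! (i * num) false) num (i + 1) else t
termination_by 50001 - i * num
decreasing_by simp [Nat.succ_mul]; omega

-- the module-level `isPrime` table after A's lazy first-call initialisation
def sieveTable : Array Bool :=
  (List.range' 2 49999).foldl
    (fun t num => if t.getD num false then markLoop t num 2 else t)
    (((Array.replicate 50001 true).set! 0 false).set! 1 false)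

-- Python `isPrime[num]`: a negative index wraps to num + len; an out-of-range index raises
-- IndexError in Python (those inputs are outside Pre_, the port's value there is immaterial)
def isPA (x : Int) : Bool :=
  if 0 ≤ x then sieveTable.getD x.toNat false else sieveTable.getD (x + 50001).toNat false

-- the arr/counts preprocessing loop (textually identical in Source A and Source B), parameterised by
-- the prime test each program uses
def buildArr (pred : Int → Bool) (nums : List Int) : List Int × List Int :=
  let s := nums.foldl
    (fun (s : List Int × List Int × Int) num =>
      if pred num then (s.1 ++ [num], s.2.1 ++ [s.2.2], 1) else (s.1, s.2.1, s.2.2 + 1))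
    ([], [], 1)
  (s.1, s.2.1 ++ [s.2.2])

structure StA where
  mnP : Int
  mxP : Int
  mnI : Int
  mxI : Int
  l : Nat
  res : Int
deriving Repr, DecidableEq

-- `minPrime = inf; for i in range(l+1, r+1): if arr[i] < minPrime: minPrime, minIndex = arr[i], i`
def rescanMin (arr : List Int) (l r : Nat) (mi : Int) : Int × Int :=
  (List.range' (l + 1) (r - l)).foldl
    (fun s i => if arr.getD i 0 < s.1 then (arr.getD i 0, (i : Int)) else s) (pvINF, mi)

def rescanMax (arr : List Int) (l r : Nat) (mi : Int) : Int × Int :=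
  (List.range' (l + 1) (r - l)).foldl
    (fun s i => if arr.getD i 0 > s.1 then (arr.getD i 0, (i : Int)) else s) (0, mi)

-- `while r - l + 1 >= 2 and maxPrime - minPrime > k: …; l += 1`
def shrinkA (arr : List Int) (k : Int) (r : Nat) (s : StA) : StA :=
  if s.l + 1 ≤ r ∧ s.mxP - s.mnP > k then
    let el := arr.getD s.l 0
    let mn := if s.mnP = el ∧ s.mnI = (s.l : Int) then rescanMin arr s.l r s.mnI else (s.mnP, s.mnI)
    let mx := if s.mxP = el ∧ s.mxI = (s.l : Int) then rescanMax arr s.l r s.mxI else (s.mxP, s.mxI)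
    shrinkA arr k r { s with mnP := mn.1, mnI := mn.2, mxP := mx.1, mxI := mx.2, l := s.l + 1 }
  else s
termination_by r - s.l
decreasing_by omega

-- one iteration of `for r in range(m)` (the dead `a, b = minIndex, maxIndex` is dropped)
def stepA (arr counts : List Int) (k : Int) (s : StA) (r : Nat) : StA :=
  let el := arr.getD r 0
  let s1 : StA :=
    { s with
      mnP := if el ≤ s.mnP then el else s.mnP, mnI := if el ≤ s.mnP then (r : Int) else s.mnI,
      mxP := if el ≥ s.mxP then el else s.mxP, mxI := if el ≥ s.mxP then (r : Int) else s.mxI }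
  let s2 := shrinkA arr k r s1
  if s2.l + 1 ≤ r then
    { s2 with res := s2.res + (PySem.List.slice counts (some (s2.l : Int)) (some (r : Int))).sum * counts.getD (r + 1) 0 }
  else s2

def primeSubarray (nums : List Int) (k : Int) : Int :=
  let ac := buildArr isPA nums
  ((List.range ac.1.length).foldl (stepA ac.1 ac.2 k) ⟨pvINF, 0, -1, -1, 0, 0⟩).res

-- ===== PORT B =====
-- B's prime test: `0 <= num < MAX and isPrime[num]`
def isPB (x : Int) : Bool :=
  decide (0 ≤ x ∧ x < 50001) && sieveTable.getD x.toNat false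

-- `while j >= 0:` of Source B, scanning left from r-1 with running min/max and early break
def innerB (arr counts : List Int) (k rt : Int) (mn mx acc : Int) (j : Nat) : Int :=
  let x := arr.getD j 0
  let mn := if x < mn then x else mn
  let mx := if x > mx then x else mx
  if mx - mn > k then acc
  else
    match j with
    | 0 => acc + counts.getD 0 0 * rt
    | j' + 1 => innerB arr counts k rt mn mx (acc + counts.getD j 0 * rt) j'

def stepB (arr counts : List Int) (k : Int) (res : Int) (r : Nat) : Int :=
  let rt := counts.getD (r + 1) 0
  match r with
  | 0 => res
  | r' + 1 => innerB arr counts k rt (arr.getD r 0) (arr.getD r 0) res r'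

def primeSubarray_alt (nums : List Int) (k : Int) : Int :=
  let ac := buildArr isPB nums
  (List.range ac.1.length).foldl (stepB ac.1 ac.2 k) 0

-- ===== PRECONDITION & SPEC =====
-- Pre_ restricts to the problem's natural domain (LeetCode 3907: 1 ≤ nums[i] ≤ 5·10^4, here
-- relaxed to 0 ≤ nums[i] ≤ 50000): outside it A either raises IndexError (entries > 50000 or
-- < -50001) or returns a value produced by Python's accidental negative-index wraparound into
-- the sieve (negative entries); B naturally treats all such entries as non-prime.
def Pre_primeSubarray (nums : List Int) (k : Int) : Prop := ∀ x ∈ nums, 0 ≤ x ∧ x ≤ 50000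
instance (nums : List Int) (k : Int) : Decidable (Pre_primeSubarray nums k) := by
  unfold Pre_primeSubarray; infer_instance

def pvWitness_primeSubarray : List Int × Int := ([2, 3, 5], 1)

def Spec_primeSubarray (nums : List Int) (k : Int) (out : Int) : Prop := out = primeSubarray_alt nums k
instance (nums : List Int) (k : Int) (out : Int) : Decidable (Spec_primeSubarray nums k out) := by
  unfold Spec_primeSubarray; infer_instance

-- ===== CLAIM (what is proved, stated in full; the proofs are below) =====
def Claim_equal_primeSubarray : Prop := ∀ (nums : List Int) (k : Int), Dom_primeSubarray nums k → Pre_primeSubarray nums k → Spec_primeSubarray nums k (primeSubarray nums k)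

-- ===== LEMMAS AND PROOFS =====

-- arr/counts as total index functions (Python only reads in-range indices; default never read)
def fA (arr : List Int) (i : Nat) : Int := arr.getD i 0

-- min/max of arr[l..r] (inclusive), the common reference both programs are compared against
def wmin (f : Nat → Int) (l r : Nat) : Int :=
  if l < r then min (f l) (wmin f (l + 1) r) else f r
termination_by r - l

def wmax (f : Nat → Int) (l r : Nat) : Int :=
  if l < r then max (f l) (wmax f (l + 1) r) else f r
termination_by r - l

-- the common reference value: for each right prime endpoint r, every left prime endpoint j < r
-- whose window is balanced contributes counts[j] * counts[r+1]
def okSum (arr counts : List Int) (k : Int) (r : Nat) : Int :=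
  ∑ j ∈ Finset.range r, (if wmax (fA arr) j r - wmin (fA arr) j r ≤ k then counts.getD j 0 else 0)

def RESV (arr counts : List Int) (k : Int) (m : Nat) : Int :=
  ∑ r ∈ Finset.range m, okSum arr counts k r * counts.getD (r + 1) 0

lemma wmin_self (f : Nat → Int) (r : Nat) : wmin f r r = f r := by
  rw [wmin]; simp

lemma wmax_self (f : Nat → Int) (r : Nat) : wmax f r r = f r := by
  rw [wmax]; simp

lemma wmin_step (f : Nat → Int) (l r : Nat) (h : l < r) :
    wmin f l r = min (f l) (wmin f (l + 1) r) := by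
  rw [wmin]; simp [h]

lemma wmax_step (f : Nat → Int) (l r : Nat) (h : l < r) :
    wmax f l r = max (f l) (wmax f (l + 1) r) := by
  rw [wmax]; simp [h]

lemma wmin_le_mem (f : Nat → Int) (l r i : Nat) (h1 : l ≤ i) (h2 : i ≤ r) :
    wmin f l r ≤ f i := by
  obtain ⟨d, rfl⟩ : ∃ d, r = l + d := ⟨r - l, by omega⟩
  induction d generalizing l with
  | zero => have : i = l := by omega
            simp [this, wmin_self]
  | succ d ih =>
    rw [wmin_step f l (l + (d + 1)) (by omega)]
    have e : l + (d + 1) = (l + 1) + d := by omega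
    rw [e]
    rcases Nat.eq_or_lt_of_le h1 with rfl | hlt
    · exact min_le_left _ _
    · exact le_trans (min_le_right _ _) (ih (l + 1) hlt (by omega))

lemma mem_le_wmax (f : Nat → Int) (l r i : Nat) (h1 : l ≤ i) (h2 : i ≤ r) :
    f i ≤ wmax f l r := by
  obtain ⟨d, rfl⟩ : ∃ d, r = l + d := ⟨r - l, by omega⟩
  induction d generalizing l with
  | zero => have : i = l := by omega
            simp [this, wmax_self]
  | succ d ih =>
    rw [wmax_step f l (l + (d + 1)) (by omega)]
    have e : l + (d + 1) = (l + 1) + d := by omega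
    rw [e]
    rcases Nat.eq_or_lt_of_le h1 with rfl | hlt
    · exact le_max_left _ _
    · exact le_trans (ih (l + 1) hlt (by omega)) (le_max_right _ _)

lemma wmin_attained (f : Nat → Int) (l r : Nat) (h : l ≤ r) :
    ∃ i, l ≤ i ∧ i ≤ r ∧ wmin f l r = f i := by
  obtain ⟨d, rfl⟩ : ∃ d, r = l + d := ⟨r - l, by omega⟩
  induction d generalizing l with
  | zero => exact ⟨l, le_rfl, by omega, by simp [wmin_self]⟩
  | succ d ih =>
    rw [wmin_step f l (l + (d + 1)) (by omega)]
    have e : l + (d + 1) = (l + 1) + d := by omega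
    rw [e]
    obtain ⟨i, hi1, hi2, hi3⟩ := ih (l + 1) (by omega)
    rcases min_cases (f l) (wmin f (l + 1) ((l + 1) + d)) with ⟨he, _⟩ | ⟨he, _⟩
    · exact ⟨l, le_rfl, by omega, he⟩
    · exact ⟨i, by omega, by omega, by rw [he]; exact hi3⟩

lemma wmax_attained (f : Nat → Int) (l r : Nat) (h : l ≤ r) :
    ∃ i, l ≤ i ∧ i ≤ r ∧ wmax f l r = f i := by
  obtain ⟨d, rfl⟩ : ∃ d, r = l + d := ⟨r - l, by omega⟩
  induction d generalizing l with
  | zero => exact ⟨l, le_rfl, by omega, by simp [wmax_self]⟩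
  | succ d ih =>
    rw [wmax_step f l (l + (d + 1)) (by omega)]
    have e : l + (d + 1) = (l + 1) + d := by omega
    rw [e]
    obtain ⟨i, hi1, hi2, hi3⟩ := ih (l + 1) (by omega)
    rcases max_cases (f l) (wmax f (l + 1) ((l + 1) + d)) with ⟨he, _⟩ | ⟨he, _⟩
    · exact ⟨l, le_rfl, by omega, he⟩
    · exact ⟨i, by omega, by omega, by rw [he]; exact hi3⟩

lemma wmin_mono_left (f : Nat → Int) (l' l r : Nat) (h1 : l' ≤ l) (h2 : l ≤ r) :
    wmin f l' r ≤ wmin f l r := by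
  obtain ⟨i, hi1, hi2, hi3⟩ := wmin_attained f l r h2
  exact hi3 ▸ wmin_le_mem f l' r i (le_trans h1 hi1) hi2

lemma wmax_mono_left (f : Nat → Int) (l' l r : Nat) (h1 : l' ≤ l) (h2 : l ≤ r) :
    wmax f l r ≤ wmax f l' r := by
  obtain ⟨i, hi1, hi2, hi3⟩ := wmax_attained f l r h2
  exact hi3 ▸ mem_le_wmax f l' r i (le_trans h1 hi1) hi2

lemma wmin_mono_right (f : Nat → Int) (l r r' : Nat) (h1 : l ≤ r) (h2 : r ≤ r') :
    wmin f l r' ≤ wmin f l r := by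
  obtain ⟨i, hi1, hi2, hi3⟩ := wmin_attained f l r h1
  exact hi3 ▸ wmin_le_mem f l r' i hi1 (le_trans hi2 h2)

lemma wmax_mono_right (f : Nat → Int) (l r r' : Nat) (h1 : l ≤ r) (h2 : r ≤ r') :
    wmax f l r ≤ wmax f l r' := by
  obtain ⟨i, hi1, hi2, hi3⟩ := wmax_attained f l r h1
  exact hi3 ▸ mem_le_wmax f l r' i hi1 (le_trans hi2 h2)

lemma wmin_right (f : Nat → Int) (l r : Nat) (h : l ≤ r) :
    wmin f l (r + 1) = min (wmin f l r) (f (r + 1)) := by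
  obtain ⟨d, rfl⟩ : ∃ d, r = l + d := ⟨r - l, by omega⟩
  induction d generalizing l with
  | zero => rw [wmin_step f l (l + 0 + 1) (by omega)]
            simp [wmin_self]
  | succ d ih =>
    rw [wmin_step f l (l + (d + 1) + 1) (by omega), wmin_step f l (l + (d + 1)) (by omega)]
    have h2 : l + (d + 1) = (l + 1) + d := by omega
    rw [h2] at *
    rw [ih (l + 1) (by omega), min_assoc]

lemma wmax_right (f : Nat → Int) (l r : Nat) (h : l ≤ r) :
    wmax f l (r + 1) = max (wmax f l r) (f (r + 1)) := by
  obtain ⟨d, rfl⟩ : ∃ d, r = l + d := ⟨r - l, by omega⟩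
  induction d generalizing l with
  | zero => rw [wmax_step f l (l + 0 + 1) (by omega)]
            simp [wmax_self]
  | succ d ih =>
    rw [wmax_step f l (l + (d + 1) + 1) (by omega), wmax_step f l (l + (d + 1)) (by omega)]
    have h2 : l + (d + 1) = (l + 1) + d := by omega
    rw [h2] at *
    rw [ih (l + 1) (by omega), max_assoc]

-- gap is anti-monotone in the left end and monotone in the right end
lemma gap_anti (f : Nat → Int) (j' j r : Nat) (h1 : j' ≤ j) (h2 : j ≤ r) :
    wmax f j r - wmin f j r ≤ wmax f j' r - wmin f j' r := by
  have := wmax_mono_left f j' j r h1 h2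
  have := wmin_mono_left f j' j r h1 h2
  omega

lemma gap_mono_right (f : Nat → Int) (j r r' : Nat) (h1 : j ≤ r) (h2 : r ≤ r') :
    wmax f j r - wmin f j r ≤ wmax f j r' - wmin f j r' := by
  have := wmax_mono_right f j r r' h1 h2
  have := wmin_mono_right f j r r' h1 h2
  omega

-- ---- B side ----

lemma ite_lt_min (x m : Int) : (if x < m then x else m) = min x m := by
  by_cases h : x < m
  · simp [h, min_eq_left h.le]
  · simp [h, min_eq_right (not_lt.1 h)]

lemma ite_gt_max (x m : Int) : (if x > m then x else m) = max x m := by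
  by_cases h : x > m
  · simp [h, max_eq_left h.le]
  · simp [h, max_eq_right (not_lt.1 h)]

lemma innerB_eq (arr counts : List Int) (k rt : Int) (r : Nat) :
    ∀ j, j < r → ∀ acc : Int,
      innerB arr counts k rt (wmin (fA arr) (j + 1) r) (wmax (fA arr) (j + 1) r) acc j
        = acc + ∑ j' ∈ Finset.range (j + 1),
            (if wmax (fA arr) j' r - wmin (fA arr) j' r ≤ k then counts.getD j' 0 * rt else 0) := by
  intro j
  induction j with
  | zero =>
    intro hj acc
    rw [innerB]
    simp only [ite_lt_min, ite_gt_max]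
    have hmn : min (arr.getD 0 0) (wmin (fA arr) (0 + 1) r) = wmin (fA arr) 0 r :=
      (wmin_step (fA arr) 0 r hj).symm
    have hmx : max (arr.getD 0 0) (wmax (fA arr) (0 + 1) r) = wmax (fA arr) 0 r :=
      (wmax_step (fA arr) 0 r hj).symm
    rw [hmn, hmx, Finset.sum_range_one]
    by_cases hgt : wmax (fA arr) 0 r - wmin (fA arr) 0 r > k
    · rw [if_pos hgt, if_neg (by omega : ¬ wmax (fA arr) 0 r - wmin (fA arr) 0 r ≤ k)]
      simp
    · rw [if_neg hgt, if_pos (by omega : wmax (fA arr) 0 r - wmin (fA arr) 0 r ≤ k)]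
  | succ j' ih =>
    intro hj acc
    rw [innerB]
    simp only [ite_lt_min, ite_gt_max]
    have hmn : min (arr.getD (j' + 1) 0) (wmin (fA arr) (j' + 1 + 1) r) = wmin (fA arr) (j' + 1) r :=
      (wmin_step (fA arr) (j' + 1) r hj).symm
    have hmx : max (arr.getD (j' + 1) 0) (wmax (fA arr) (j' + 1 + 1) r) = wmax (fA arr) (j' + 1) r :=
      (wmax_step (fA arr) (j' + 1) r hj).symm
    rw [hmn, hmx]
    by_cases hgt : wmax (fA arr) (j' + 1) r - wmin (fA arr) (j' + 1) r > k
    · simp only [if_pos hgt]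
      rw [Finset.sum_eq_zero, add_zero]
      intro j'' hj''
      have hle : j'' ≤ j' + 1 := by simpa [Nat.lt_succ_iff] using Finset.mem_range.1 hj''
      have := gap_anti (fA arr) j'' (j' + 1) r hle (le_of_lt hj)
      rw [if_neg (by omega)]
    · simp only [if_neg hgt]
      rw [ih (by omega) (acc + counts.getD (j' + 1) 0 * rt), Finset.sum_range_succ _ (j' + 1),
        if_pos (by omega : wmax (fA arr) (j' + 1) r - wmin (fA arr) (j' + 1) r ≤ k)]
      ring

lemma stepB_eq (arr counts : List Int) (k res : Int) (r : Nat) :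
    stepB arr counts k res r = res + okSum arr counts k r * counts.getD (r + 1) 0 := by
  match r with
  | 0 => simp [stepB, okSum]
  | r' + 1 =>
    show innerB arr counts k (counts.getD (r' + 1 + 1) 0) (arr.getD (r' + 1) 0) (arr.getD (r' + 1) 0) res r' = _
    have h0 : arr.getD (r' + 1) 0 = wmin (fA arr) (r' + 1) (r' + 1) := (wmin_self (fA arr) (r' + 1)).symm
    have h1 : arr.getD (r' + 1) 0 = wmax (fA arr) (r' + 1) (r' + 1) := (wmax_self (fA arr) (r' + 1)).symm
    rw [show innerB arr counts k (counts.getD (r' + 1 + 1) 0) (arr.getD (r' + 1) 0) (arr.getD (r' + 1) 0) res r'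
        = innerB arr counts k (counts.getD (r' + 1 + 1) 0) (wmin (fA arr) (r' + 1) (r' + 1)) (wmax (fA arr) (r' + 1) (r' + 1)) res r' by rw [← h0, ← h1]]
    rw [innerB_eq arr counts k (counts.getD (r' + 1 + 1) 0) (r' + 1) r' (Nat.lt_succ_self r') res]
    unfold okSum
    rw [Finset.sum_mul]
    congr 1
    apply Finset.sum_congr rfl
    intro j hj
    split_ifs <;> simp

lemma foldB_eq (arr counts : List Int) (k : Int) (m : Nat) :
    (List.range m).foldl (stepB arr counts k) 0 = RESV arr counts k m := by
  induction m with
  | zero => simp [RESV]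
  | succ m ih =>
    rw [List.range_succ, List.foldl_append, List.foldl_cons, List.foldl_nil, ih, stepB_eq]
    unfold RESV
    rw [Finset.sum_range_succ]

-- ---- A side ----

-- window-state invariant after processing right end r: extrema are the true window extrema,
-- the stored indices are (essentially) witnesses, and l is minimal balanced
def InvW (arr : List Int) (k : Int) (r : Nat) (s : StA) : Prop :=
  s.l ≤ r ∧
  s.mnP = wmin (fA arr) s.l r ∧ s.mxP = wmax (fA arr) s.l r ∧
  (∃ i : Nat, s.mnI = (i : Int) ∧ s.l ≤ i ∧ i ≤ r ∧ fA arr i = s.mnP) ∧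
  ((∃ i : Nat, s.mxI = (i : Int) ∧ s.l ≤ i ∧ i ≤ r ∧ fA arr i = s.mxP) ∨ s.mxP = 0) ∧
  (∀ l', l' < s.l → wmax (fA arr) l' r - wmin (fA arr) l' r > k)

lemma scanMin_fold (arr : List Int) :
    ∀ (n a : Nat) (v w : Int), 1 ≤ n →
      (((List.range' a n).foldl
          (fun s i => if arr.getD i 0 < s.1 then (arr.getD i 0, (i : Int)) else s) (v, w)).1
        = min v (wmin (fA arr) a (a + n - 1))) ∧
      (((List.range' a n).foldl
          (fun s i => if arr.getD i 0 < s.1 then (arr.getD i 0, (i : Int)) else s) (v, w)) = (v, w) ∨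
        ∃ i, a ≤ i ∧ i ≤ a + n - 1 ∧
          ((List.range' a n).foldl
            (fun s i => if arr.getD i 0 < s.1 then (arr.getD i 0, (i : Int)) else s) (v, w)) = (fA arr i, (i : Int))) := by
  intro n
  induction n with
  | zero => intro a v w h; omega
  | succ n ih =>
    intro a v w _
    rcases Nat.eq_zero_or_pos n with rfl | hn
    · simp only [zero_add, List.range'_one, List.foldl_cons, List.foldl_nil, Nat.add_sub_cancel]
      by_cases hlt : arr.getD a 0 < v
      · rw [if_pos hlt]
        refine ⟨?_, Or.inr ⟨a, le_rfl, le_rfl, rfl⟩⟩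
        rw [wmin_self]
        exact (min_eq_right (le_of_lt hlt)).symm
      · rw [if_neg hlt]
        refine ⟨?_, Or.inl rfl⟩
        rw [wmin_self]
        exact (min_eq_left (not_lt.1 hlt)).symm
    · rw [List.range'_succ, List.foldl_cons]
      have harith : a + 1 + n - 1 = a + (n + 1) - 1 := by omega
      have hstep : wmin (fA arr) a (a + (n + 1) - 1) =
          min (fA arr a) (wmin (fA arr) (a + 1) (a + (n + 1) - 1)) :=
        wmin_step (fA arr) a (a + (n + 1) - 1) (by omega)
      by_cases hlt : arr.getD a 0 < v
      · rw [if_pos hlt]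
        obtain ⟨h1, h2⟩ := ih (a + 1) (arr.getD a 0) (a : Int) hn
        rw [harith] at h1 h2
        constructor
        · rw [h1, hstep]
          have hfa : fA arr a = arr.getD a 0 := rfl
          rw [← hfa] at hlt ⊢
          have hle : min (fA arr a) (wmin (fA arr) (a + 1) (a + (n + 1) - 1)) ≤ v := by
            have := min_le_left (fA arr a) (wmin (fA arr) (a + 1) (a + (n + 1) - 1))
            omega
          rw [min_eq_right hle]
        · rcases h2 with h2 | ⟨i, hi1, hi2, hi3⟩
          · exact Or.inr ⟨a, le_rfl, by omega, h2⟩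
          · exact Or.inr ⟨i, by omega, hi2, hi3⟩
      · rw [if_neg hlt]
        obtain ⟨h1, h2⟩ := ih (a + 1) v w hn
        rw [harith] at h1 h2
        constructor
        · rw [h1, hstep]
          have hv : v ≤ fA arr a := not_lt.1 hlt
          rw [← min_assoc, min_eq_left hv]
        · rcases h2 with h2 | ⟨i, hi1, hi2, hi3⟩
          · exact Or.inl h2
          · exact Or.inr ⟨i, by omega, hi2, hi3⟩

lemma rescanMin_spec (arr : List Int) (l r : Nat) (mi : Int)
    (hInf : ∀ i, fA arr i < pvINF) (h : l + 1 ≤ r) :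
    (rescanMin arr l r mi).1 = wmin (fA arr) (l + 1) r ∧
      ∃ i, l + 1 ≤ i ∧ i ≤ r ∧ rescanMin arr l r mi = (fA arr i, (i : Int)) := by
  have hn : 1 ≤ r - l := by omega
  obtain ⟨h1, h2⟩ := scanMin_fold arr (r - l) (l + 1) pvINF mi hn
  have he : l + 1 + (r - l) - 1 = r := by omega
  rw [he] at h1 h2
  have hlt : wmin (fA arr) (l + 1) r < pvINF := by
    obtain ⟨i, _, _, hi⟩ := wmin_attained (fA arr) (l + 1) r h
    rw [hi]; exact hInf i
  have h1' : (rescanMin arr l r mi).1 = wmin (fA arr) (l + 1) r := by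
    rw [rescanMin, h1, min_eq_right (le_of_lt hlt)]
  refine ⟨h1', ?_⟩
  rcases h2 with h2 | ⟨i, hi1, hi2, hi3⟩
  · exfalso
    have : (rescanMin arr l r mi).1 = pvINF := by rw [rescanMin, h2]
    omega
  · exact ⟨i, hi1, hi2, by rw [rescanMin, hi3]⟩

lemma scanMax_fold (arr : List Int) :
    ∀ (n a : Nat) (v w : Int), 1 ≤ n →
      (((List.range' a n).foldl
          (fun s i => if arr.getD i 0 > s.1 then (arr.getD i 0, (i : Int)) else s) (v, w)).1
        = max v (wmax (fA arr) a (a + n - 1))) ∧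
      (((List.range' a n).foldl
          (fun s i => if arr.getD i 0 > s.1 then (arr.getD i 0, (i : Int)) else s) (v, w)) = (v, w) ∨
        ∃ i, a ≤ i ∧ i ≤ a + n - 1 ∧
          ((List.range' a n).foldl
            (fun s i => if arr.getD i 0 > s.1 then (arr.getD i 0, (i : Int)) else s) (v, w)) = (fA arr i, (i : Int))) := by
  intro n
  induction n with
  | zero => intro a v w h; omega
  | succ n ih =>
    intro a v w _
    rcases Nat.eq_zero_or_pos n with rfl | hn
    · simp only [zero_add, List.range'_one, List.foldl_cons, List.foldl_nil, Nat.add_sub_cancel]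
      by_cases hlt : arr.getD a 0 > v
      · rw [if_pos hlt]
        refine ⟨?_, Or.inr ⟨a, le_rfl, le_rfl, rfl⟩⟩
        rw [wmax_self]
        exact (max_eq_right (le_of_lt hlt)).symm
      · rw [if_neg hlt]
        refine ⟨?_, Or.inl rfl⟩
        rw [wmax_self]
        exact (max_eq_left (not_lt.1 hlt)).symm
    · rw [List.range'_succ, List.foldl_cons]
      have harith : a + 1 + n - 1 = a + (n + 1) - 1 := by omega
      have hstep : wmax (fA arr) a (a + (n + 1) - 1) =
          max (fA arr a) (wmax (fA arr) (a + 1) (a + (n + 1) - 1)) :=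
        wmax_step (fA arr) a (a + (n + 1) - 1) (by omega)
      by_cases hlt : arr.getD a 0 > v
      · rw [if_pos hlt]
        obtain ⟨h1, h2⟩ := ih (a + 1) (arr.getD a 0) (a : Int) hn
        rw [harith] at h1 h2
        constructor
        · rw [h1, hstep]
          have hfa : fA arr a = arr.getD a 0 := rfl
          rw [← hfa] at hlt ⊢
          have hle : v ≤ max (fA arr a) (wmax (fA arr) (a + 1) (a + (n + 1) - 1)) := by
            have := le_max_left (fA arr a) (wmax (fA arr) (a + 1) (a + (n + 1) - 1))
            omega
          rw [max_eq_right hle]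
        · rcases h2 with h2 | ⟨i, hi1, hi2, hi3⟩
          · exact Or.inr ⟨a, le_rfl, by omega, h2⟩
          · exact Or.inr ⟨i, by omega, hi2, hi3⟩
      · rw [if_neg hlt]
        obtain ⟨h1, h2⟩ := ih (a + 1) v w hn
        rw [harith] at h1 h2
        constructor
        · rw [h1, hstep]
          have hv : fA arr a ≤ v := not_lt.1 hlt
          rw [← max_assoc, max_eq_left hv]
        · rcases h2 with h2 | ⟨i, hi1, hi2, hi3⟩
          · exact Or.inl h2
          · exact Or.inr ⟨i, by omega, hi2, hi3⟩

lemma rescanMax_spec (arr : List Int) (l r : Nat) (mi : Int)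
    (hPos : ∀ i, 0 ≤ fA arr i) (h : l + 1 ≤ r) :
    (rescanMax arr l r mi).1 = wmax (fA arr) (l + 1) r ∧
      ((∃ i, l + 1 ≤ i ∧ i ≤ r ∧ rescanMax arr l r mi = (fA arr i, (i : Int))) ∨
        (rescanMax arr l r mi).1 = 0) := by
  have hn : 1 ≤ r - l := by omega
  obtain ⟨h1, h2⟩ := scanMax_fold arr (r - l) (l + 1) 0 mi hn
  have he : l + 1 + (r - l) - 1 = r := by omega
  rw [he] at h1 h2
  have hge : (0 : Int) ≤ wmax (fA arr) (l + 1) r :=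
    le_trans (hPos r) (mem_le_wmax (fA arr) (l + 1) r r h le_rfl)
  have h1' : (rescanMax arr l r mi).1 = wmax (fA arr) (l + 1) r := by
    rw [rescanMax, h1, max_eq_right hge]
  refine ⟨h1', ?_⟩
  rcases h2 with h2 | ⟨i, hi1, hi2, hi3⟩
  · exact Or.inr (by rw [rescanMax, h2])
  · exact Or.inl ⟨i, hi1, hi2, by rw [rescanMax, hi3]⟩

lemma shrinkA_spec (arr : List Int) (k : Int) (r : Nat)
    (hPos : ∀ i, 0 ≤ fA arr i) (hInf : ∀ i, fA arr i < pvINF) :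
    ∀ s : StA, InvW arr k r s →
      InvW arr k r (shrinkA arr k r s) ∧ s.l ≤ (shrinkA arr k r s).l ∧
        (shrinkA arr k r s).res = s.res ∧
        ((shrinkA arr k r s).l = r ∨
          wmax (fA arr) (shrinkA arr k r s).l r - wmin (fA arr) (shrinkA arr k r s).l r ≤ k) := by
  suffices H : ∀ (n : Nat) (s : StA), r - s.l ≤ n → InvW arr k r s →
      InvW arr k r (shrinkA arr k r s) ∧ s.l ≤ (shrinkA arr k r s).l ∧
        (shrinkA arr k r s).res = s.res ∧
        ((shrinkA arr k r s).l = r ∨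
          wmax (fA arr) (shrinkA arr k r s).l r - wmin (fA arr) (shrinkA arr k r s).l r ≤ k) by
    exact fun s hs => H (r - s.l) s le_rfl hs
  intro n
  induction n with
  | zero =>
    intro s hn hs
    have hlr : s.l = r := by
      obtain ⟨h1, _⟩ := hs
      omega
    rw [shrinkA, if_neg (by omega : ¬ (s.l + 1 ≤ r ∧ s.mxP - s.mnP > k))]
    exact ⟨hs, le_rfl, rfl, Or.inl hlr⟩
  | succ n ih =>
    intro s hn hs
    obtain ⟨hlr, hmn, hmx, ⟨iw, hiw1, hiw2, hiw3, hiw4⟩, hmaxw, hminim⟩ := hs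
    by_cases hg : s.l + 1 ≤ r ∧ s.mxP - s.mnP > k
    · rw [shrinkA, if_pos hg]
      simp only []
      have hgap : wmax (fA arr) s.l r - wmin (fA arr) s.l r > k := by
        rw [← hmn, ← hmx]; exact hg.2
      have hmeas : r - (s.l + 1) ≤ n := by omega
      -- the new min value/index pair
      have hMn : ∀ p : Int × Int,
          p = (if s.mnP = arr.getD s.l 0 ∧ s.mnI = (s.l : Int) then rescanMin arr s.l r s.mnI
               else (s.mnP, s.mnI)) →
          p.1 = wmin (fA arr) (s.l + 1) r ∧
            ∃ i : Nat, p.2 = (i : Int) ∧ s.l + 1 ≤ i ∧ i ≤ r ∧ fA arr i = p.1 := by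
        intro p hp
        by_cases hc : s.mnP = arr.getD s.l 0 ∧ s.mnI = (s.l : Int)
        · rw [if_pos hc] at hp
          obtain ⟨h1, i, hi1, hi2, hi3⟩ := rescanMin_spec arr s.l r s.mnI hInf hg.1
          subst hp
          exact ⟨h1, i, by rw [hi3], hi1, hi2, by rw [hi3]⟩
        · rw [if_neg hc] at hp
          have hil : s.l + 1 ≤ iw := by
            rcases Nat.lt_or_ge iw (s.l + 1) with h' | h'
            · exfalso
              have : iw = s.l := by omega
              subst this
              exact hc ⟨hiw4.symm, hiw1⟩
            · exact h'
          have h1 : s.mnP = wmin (fA arr) (s.l + 1) r := by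
            have ha : wmin (fA arr) (s.l + 1) r ≤ s.mnP := by
              rw [← hiw4]; exact wmin_le_mem (fA arr) (s.l + 1) r iw hil hiw3
            have hb : s.mnP ≤ wmin (fA arr) (s.l + 1) r := by
              rw [hmn]; exact wmin_mono_left (fA arr) s.l (s.l + 1) r (by omega) hg.1
            omega
          subst hp
          exact ⟨h1.symm ▸ rfl, iw, hiw1, hil, hiw3, hiw4⟩
      -- the new max value/index pair
      have hMx : ∀ p : Int × Int,
          p = (if s.mxP = arr.getD s.l 0 ∧ s.mxI = (s.l : Int) then rescanMax arr s.l r s.mxI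
               else (s.mxP, s.mxI)) →
          p.1 = wmax (fA arr) (s.l + 1) r ∧
            ((∃ i : Nat, p.2 = (i : Int) ∧ s.l + 1 ≤ i ∧ i ≤ r ∧ fA arr i = p.1) ∨ p.1 = 0) := by
        intro p hp
        by_cases hc : s.mxP = arr.getD s.l 0 ∧ s.mxI = (s.l : Int)
        · rw [if_pos hc] at hp
          obtain ⟨h1, hd⟩ := rescanMax_spec arr s.l r s.mxI hPos hg.1
          subst hp
          refine ⟨h1, ?_⟩
          rcases hd with ⟨i, hi1, hi2, hi3⟩ | hz
          · exact Or.inl ⟨i, by rw [hi3], hi1, hi2, by rw [hi3]⟩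
          · exact Or.inr hz
        · rw [if_neg hc] at hp
          rcases hmaxw with ⟨ix, hix1, hix2, hix3, hix4⟩ | hz
          · have hil : s.l + 1 ≤ ix := by
              rcases Nat.lt_or_ge ix (s.l + 1) with h' | h'
              · exfalso
                have : ix = s.l := by omega
                subst this
                exact hc ⟨hix4.symm, hix1⟩
              · exact h'
            have h1 : s.mxP = wmax (fA arr) (s.l + 1) r := by
              have ha : s.mxP ≤ wmax (fA arr) (s.l + 1) r := by
                rw [← hix4]; exact mem_le_wmax (fA arr) (s.l + 1) r ix hil hix3
              have hb : wmax (fA arr) (s.l + 1) r ≤ s.mxP := by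
                rw [hmx]; exact wmax_mono_left (fA arr) s.l (s.l + 1) r (by omega) hg.1
              omega
            subst hp
            exact ⟨h1.symm ▸ rfl, Or.inl ⟨ix, hix1, hil, hix3, hix4⟩⟩
          · have h1 : wmax (fA arr) (s.l + 1) r = 0 := by
              have ha : wmax (fA arr) (s.l + 1) r ≤ 0 := by
                rw [← hz, hmx]
                exact wmax_mono_left (fA arr) s.l (s.l + 1) r (by omega) hg.1
              have hb : (0 : Int) ≤ wmax (fA arr) (s.l + 1) r :=
                le_trans (hPos r) (mem_le_wmax (fA arr) (s.l + 1) r r hg.1 le_rfl)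
              omega
            subst hp
            exact ⟨by rw [h1]; exact hz, Or.inr hz⟩
      obtain ⟨hMn1, im, him1, him2, him3, him4⟩ := hMn _ rfl
      obtain ⟨hMx1, hMx2⟩ := hMx _ rfl
      have hInv' : InvW arr k r
          { s with
            mnP := (if s.mnP = arr.getD s.l 0 ∧ s.mnI = (s.l : Int) then rescanMin arr s.l r s.mnI else (s.mnP, s.mnI)).1,
            mnI := (if s.mnP = arr.getD s.l 0 ∧ s.mnI = (s.l : Int) then rescanMin arr s.l r s.mnI else (s.mnP, s.mnI)).2,
            mxP := (if s.mxP = arr.getD s.l 0 ∧ s.mxI = (s.l : Int) then rescanMax arr s.l r s.mxI else (s.mxP, s.mxI)).1,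
            mxI := (if s.mxP = arr.getD s.l 0 ∧ s.mxI = (s.l : Int) then rescanMax arr s.l r s.mxI else (s.mxP, s.mxI)).2,
            l := s.l + 1 } := by
        refine ⟨hg.1, hMn1, hMx1, ⟨im, him1, him2, him3, him4⟩, ?_, ?_⟩
        · rcases hMx2 with ⟨ix, h1, h2, h3, h4⟩ | hz
          · exact Or.inl ⟨ix, h1, h2, h3, h4⟩
          · exact Or.inr hz
        · intro l' hl'
          have hl'' : l' < s.l + 1 := hl'
          rcases Nat.lt_or_ge l' s.l with h' | h'
          · exact hminim l' h'
          · have : l' = s.l := by omega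
            subst this
            exact hgap
      obtain ⟨c1, c2, c3, c4⟩ := ih _ hmeas hInv'
      exact ⟨c1, le_trans (Nat.le_succ s.l) c2, c3, c4⟩
    · rw [shrinkA, if_neg hg]
      refine ⟨⟨hlr, hmn, hmx, ⟨iw, hiw1, hiw2, hiw3, hiw4⟩, hmaxw, hminim⟩, le_rfl, rfl, ?_⟩
      rcases Nat.lt_or_ge s.l r with h' | h'
      · right
        rw [← hmn, ← hmx]
        omega
      · left
        omega

lemma okSum_eq (arr counts : List Int) (k : Int) (r l2 : Nat)
    (h1 : ∀ l', l' < l2 → wmax (fA arr) l' r - wmin (fA arr) l' r > k)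
    (h2 : l2 ≤ r)
    (h3 : l2 = r ∨ wmax (fA arr) l2 r - wmin (fA arr) l2 r ≤ k) :
    okSum arr counts k r = ∑ j ∈ Finset.Ico l2 r, counts.getD j 0 := by
  unfold okSum
  rw [Finset.range_eq_Ico, ← Finset.sum_Ico_consecutive _ (Nat.zero_le l2) h2]
  have hleft : (∑ j ∈ Finset.Ico 0 l2,
      (if wmax (fA arr) j r - wmin (fA arr) j r ≤ k then counts.getD j 0 else 0)) = 0 := by
    apply Finset.sum_eq_zero
    intro j hj
    have := h1 j (Finset.mem_Ico.1 hj).2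
    rw [if_neg (by omega)]
  have hright : (∑ j ∈ Finset.Ico l2 r,
      (if wmax (fA arr) j r - wmin (fA arr) j r ≤ k then counts.getD j 0 else 0))
      = ∑ j ∈ Finset.Ico l2 r, counts.getD j 0 := by
    apply Finset.sum_congr rfl
    intro j hj
    obtain ⟨hj1, hj2⟩ := Finset.mem_Ico.1 hj
    have hk : wmax (fA arr) l2 r - wmin (fA arr) l2 r ≤ k := by
      rcases h3 with h3 | h3
      · omega
      · exact h3
    have := gap_anti (fA arr) l2 j r hj1 (le_of_lt hj2)
    rw [if_pos (by omega)]
  rw [hleft, hright, zero_add]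

lemma dropTake_sum (counts : List Int) :
    ∀ (n a : Nat), a + n ≤ counts.length →
      ((counts.drop a).take n).sum = ∑ j ∈ Finset.Ico a (a + n), counts.getD j 0 := by
  intro n
  induction n with
  | zero => simp
  | succ n ih =>
    intro a ha
    have hlt : a < counts.length := by omega
    rw [List.drop_eq_getElem_cons hlt, List.take_succ_cons, List.sum_cons,
      ih (a + 1) (by omega)]
    rw [Finset.sum_eq_sum_Ico_succ_bot (by omega : a < a + (n + 1))]
    rw [List.getD_eq_getElem counts 0 hlt]
    have e : a + 1 + n = a + (n + 1) := by omega
    rw [e]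

lemma shrinkA_stop (arr : List Int) (k : Int) (r : Nat) (s : StA) (h : ¬ (s.l + 1 ≤ r)) :
    shrinkA arr k r s = s := by
  rw [shrinkA, if_neg (fun hh => h hh.1)]

lemma stepA_base (arr counts : List Int) (k : Int)
    (hPos : ∀ i, 0 ≤ fA arr i) (hInf : ∀ i, fA arr i < pvINF) :
    InvW arr k 0 (stepA arr counts k ⟨pvINF, 0, -1, -1, 0, 0⟩ 0) ∧
      (stepA arr counts k ⟨pvINF, 0, -1, -1, 0, 0⟩ 0).res = 0 := by
  have h1 : arr.getD 0 0 ≤ (⟨pvINF, 0, -1, -1, 0, 0⟩ : StA).mnP := le_of_lt (hInf 0)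
  have h2 : arr.getD 0 0 ≥ (⟨pvINF, 0, -1, -1, 0, 0⟩ : StA).mxP := hPos 0
  simp only [stepA, if_pos h1, if_pos h2]
  rw [shrinkA_stop arr k 0 _ (by omega : ¬ ((0 : Nat) + 1 ≤ 0))]
  rw [if_neg (by omega : ¬ ((0 : Nat) + 1 ≤ 0))]
  refine ⟨⟨le_rfl, ?_, ?_, ⟨0, rfl, le_rfl, le_rfl, rfl⟩, Or.inl ⟨0, rfl, le_rfl, le_rfl, rfl⟩,
    fun l' hl' => absurd hl' (Nat.not_lt_zero l')⟩, rfl⟩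
  · exact (wmin_self (fA arr) 0).symm
  · exact (wmax_self (fA arr) 0).symm

lemma stepA_spec (arr counts : List Int) (k : Int)
    (hPos : ∀ i, 0 ≤ fA arr i) (hInf : ∀ i, fA arr i < pvINF)
    (hlen : counts.length = arr.length + 1)
    (r : Nat) (hr : r + 1 < arr.length) (s : StA) (h : InvW arr k r s) :
    InvW arr k (r + 1) (stepA arr counts k s (r + 1)) ∧
      (stepA arr counts k s (r + 1)).res = s.res + okSum arr counts k (r + 1) * counts.getD (r + 2) 0 := by
  obtain ⟨hlr, hmn, hmx, ⟨iw, hiw1, hiw2, hiw3, hiw4⟩, hmaxw, hminim⟩ := h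
  have hmnr := wmin_right (fA arr) s.l r hlr
  have hmxr := wmax_right (fA arr) s.l r hlr
  have hInv1 : InvW arr k (r + 1)
      ({ s with
        mnP := if arr.getD (r + 1) 0 ≤ s.mnP then arr.getD (r + 1) 0 else s.mnP,
        mnI := if arr.getD (r + 1) 0 ≤ s.mnP then ((r + 1 : Nat) : Int) else s.mnI,
        mxP := if arr.getD (r + 1) 0 ≥ s.mxP then arr.getD (r + 1) 0 else s.mxP,
        mxI := if arr.getD (r + 1) 0 ≥ s.mxP then ((r + 1 : Nat) : Int) else s.mxI } : StA) := by
    refine ⟨show s.l ≤ r + 1 by omega, ?_, ?_, ?_, ?_, ?_⟩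
    · show (if arr.getD (r + 1) 0 ≤ s.mnP then arr.getD (r + 1) 0 else s.mnP) = wmin (fA arr) s.l (r + 1)
      by_cases hc : arr.getD (r + 1) 0 ≤ s.mnP
      · rw [if_pos hc, hmnr, min_eq_right (by rw [← hmn]; exact hc)]
        rfl
      · rw [if_neg hc, hmnr, min_eq_left (by rw [← hmn]; exact le_of_lt (not_le.1 hc)), hmn]
    · show (if arr.getD (r + 1) 0 ≥ s.mxP then arr.getD (r + 1) 0 else s.mxP) = wmax (fA arr) s.l (r + 1)
      by_cases hc : arr.getD (r + 1) 0 ≥ s.mxP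
      · rw [if_pos hc, hmxr, max_eq_right (by rw [← hmx]; exact hc)]
        rfl
      · rw [if_neg hc, hmxr, max_eq_left (by rw [← hmx]; exact le_of_lt (not_le.1 hc)), hmx]
    · by_cases hc : arr.getD (r + 1) 0 ≤ s.mnP
      · refine ⟨r + 1, ?_, show s.l ≤ r + 1 by omega, le_rfl, ?_⟩
        · show (if arr.getD (r + 1) 0 ≤ s.mnP then ((r + 1 : Nat) : Int) else s.mnI) = ((r + 1 : Nat) : Int)
          rw [if_pos hc]
        · show fA arr (r + 1) = (if arr.getD (r + 1) 0 ≤ s.mnP then arr.getD (r + 1) 0 else s.mnP)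
          rw [if_pos hc]; rfl
      · refine ⟨iw, ?_, show s.l ≤ iw from hiw2, by omega, ?_⟩
        · show (if arr.getD (r + 1) 0 ≤ s.mnP then ((r + 1 : Nat) : Int) else s.mnI) = (iw : Int)
          rw [if_neg hc]; exact hiw1
        · show fA arr iw = (if arr.getD (r + 1) 0 ≤ s.mnP then arr.getD (r + 1) 0 else s.mnP)
          rw [if_neg hc]; exact hiw4
    · by_cases hc : arr.getD (r + 1) 0 ≥ s.mxP
      · refine Or.inl ⟨r + 1, ?_, show s.l ≤ r + 1 by omega, le_rfl, ?_⟩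
        · show (if arr.getD (r + 1) 0 ≥ s.mxP then ((r + 1 : Nat) : Int) else s.mxI) = ((r + 1 : Nat) : Int)
          rw [if_pos hc]
        · show fA arr (r + 1) = (if arr.getD (r + 1) 0 ≥ s.mxP then arr.getD (r + 1) 0 else s.mxP)
          rw [if_pos hc]; rfl
      · rcases hmaxw with ⟨ix, hx1, hx2, hx3, hx4⟩ | hz
        · refine Or.inl ⟨ix, ?_, show s.l ≤ ix from hx2, by omega, ?_⟩
          · show (if arr.getD (r + 1) 0 ≥ s.mxP then ((r + 1 : Nat) : Int) else s.mxI) = (ix : Int)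
            rw [if_neg hc]; exact hx1
          · show fA arr ix = (if arr.getD (r + 1) 0 ≥ s.mxP then arr.getD (r + 1) 0 else s.mxP)
            rw [if_neg hc]; exact hx4
        · refine Or.inr ?_
          show (if arr.getD (r + 1) 0 ≥ s.mxP then arr.getD (r + 1) 0 else s.mxP) = 0
          rw [if_neg hc]; exact hz
    · intro l' hl'
      have hl'' : l' < s.l := hl'
      have ha := hminim l' hl''
      have hb := gap_mono_right (fA arr) l' r (r + 1) (by omega) (by omega)
      show wmax (fA arr) l' (r + 1) - wmin (fA arr) l' (r + 1) > k
      omega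
  set s2 : StA := shrinkA arr k (r + 1)
      ({ s with
        mnP := if arr.getD (r + 1) 0 ≤ s.mnP then arr.getD (r + 1) 0 else s.mnP,
        mnI := if arr.getD (r + 1) 0 ≤ s.mnP then ((r + 1 : Nat) : Int) else s.mnI,
        mxP := if arr.getD (r + 1) 0 ≥ s.mxP then arr.getD (r + 1) 0 else s.mxP,
        mxI := if arr.getD (r + 1) 0 ≥ s.mxP then ((r + 1 : Nat) : Int) else s.mxI } : StA) with hs2
  obtain ⟨h2a, h2b, h2c, h2d⟩ := shrinkA_spec arr k (r + 1) hPos hInf _ hInv1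
  rw [← hs2] at h2a h2b h2c h2d
  have h2c' : s2.res = s.res := h2c
  obtain ⟨h3a, h3b, h3c, hw3, h3e, h3f⟩ := h2a
  simp only [stepA, ← hs2]
  by_cases hfin : s2.l + 1 ≤ r + 1
  · rw [if_pos hfin]
    refine ⟨⟨h3a, h3b, h3c, hw3, h3e, h3f⟩, ?_⟩
    show s2.res + (PySem.List.slice counts (some (s2.l : Int)) (some ((r + 1 : Nat) : Int))).sum
        * counts.getD (r + 1 + 1) 0 = _
    rw [h2c', PySem.List.slice_natCast, dropTake_sum counts ((r + 1) - s2.l) s2.l (by omega),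
      show s2.l + ((r + 1) - s2.l) = r + 1 by omega,
      okSum_eq arr counts k (r + 1) s2.l h3f h3a h2d]
  · rw [if_neg hfin]
    have hle : s2.l = r + 1 := by omega
    refine ⟨⟨h3a, h3b, h3c, hw3, h3e, h3f⟩, ?_⟩
    show s2.res = _
    rw [h2c', okSum_eq arr counts k (r + 1) (r + 1) (fun l' hl' => h3f l' (by omega)) le_rfl (Or.inl rfl)]
    simp

lemma foldA_eq (arr counts : List Int) (k : Int)
    (hPos : ∀ i, 0 ≤ fA arr i) (hInf : ∀ i, fA arr i < pvINF)
    (hlen : counts.length = arr.length + 1) :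
    ∀ m, 1 ≤ m → m ≤ arr.length →
      InvW arr k (m - 1) ((List.range m).foldl (stepA arr counts k) ⟨pvINF, 0, -1, -1, 0, 0⟩) ∧
        ((List.range m).foldl (stepA arr counts k) ⟨pvINF, 0, -1, -1, 0, 0⟩).res = RESV arr counts k m := by
  intro m
  induction m with
  | zero => intro h; omega
  | succ m ih =>
    intro _ hm
    rcases Nat.eq_zero_or_pos m with rfl | hm1
    · obtain ⟨hb1, hb2⟩ := stepA_base arr counts k hPos hInf
      rw [List.range_one, List.foldl_cons, List.foldl_nil]
      refine ⟨hb1, ?_⟩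
      rw [hb2]
      simp [RESV, okSum]
    · obtain ⟨m', rfl⟩ : ∃ m', m = m' + 1 := ⟨m - 1, by omega⟩
      rw [List.range_succ, List.foldl_append, List.foldl_cons, List.foldl_nil]
      obtain ⟨hI, hres⟩ := ih (by omega) (by omega)
      rw [Nat.add_sub_cancel] at hI
      obtain ⟨hs1, hs2⟩ := stepA_spec arr counts k hPos hInf hlen m' (by omega)
        ((List.range (m' + 1)).foldl (stepA arr counts k) ⟨pvINF, 0, -1, -1, 0, 0⟩) hI
      rw [Nat.add_sub_cancel]
      refine ⟨hs1, ?_⟩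
      have expand : RESV arr counts k (m' + 1 + 1)
          = RESV arr counts k (m' + 1) + okSum arr counts k (m' + 1) * counts.getD (m' + 1 + 1) 0 :=
        Finset.sum_range_succ _ (m' + 1)
      rw [hs2, hres, expand, show m' + 1 + 1 = m' + 2 from rfl]

-- ---- assembly ----

lemma buildAux_len (pred : Int → Bool) :
    ∀ (l : List Int) (s : List Int × List Int × Int), s.2.1.length = s.1.length →
      ((l.foldl (fun (s : List Int × List Int × Int) num =>
          if pred num then (s.1 ++ [num], s.2.1 ++ [s.2.2], 1)
          else (s.1, s.2.1, s.2.2 + 1)) s).2.1.length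
        = (l.foldl (fun (s : List Int × List Int × Int) num =>
          if pred num then (s.1 ++ [num], s.2.1 ++ [s.2.2], 1)
          else (s.1, s.2.1, s.2.2 + 1)) s).1.length) := by
  intro l
  induction l with
  | nil => intro s h; simpa using h
  | cons a l ih =>
    intro s h
    rw [List.foldl_cons]
    apply ih
    by_cases hp : pred a <;> simp [hp, h]

lemma buildArr_len (pred : Int → Bool) (nums : List Int) :
    (buildArr pred nums).2.length = (buildArr pred nums).1.length + 1 := by
  unfold buildArr
  simp [buildAux_len pred nums ([], [], 1) rfl]

lemma buildAux_mem (pred : Int → Bool) :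
    ∀ (l : List Int) (s : List Int × List Int × Int) (x : Int),
      x ∈ (l.foldl (fun (s : List Int × List Int × Int) num =>
          if pred num then (s.1 ++ [num], s.2.1 ++ [s.2.2], 1)
          else (s.1, s.2.1, s.2.2 + 1)) s).1 → x ∈ s.1 ∨ x ∈ l := by
  intro l
  induction l with
  | nil => intro s x h; exact Or.inl h
  | cons a l ih =>
    intro s x h
    rw [List.foldl_cons] at h
    rcases ih _ x h with h' | h'
    · by_cases hp : pred a
      · simp [hp] at h'
        rcases h' with h' | h'
        · exact Or.inl h'
        · exact Or.inr (by simp [h'])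
      · simp [hp] at h'
        exact Or.inl h'
    · exact Or.inr (List.mem_cons_of_mem a h')

lemma buildArr_mem (pred : Int → Bool) (nums : List Int) :
    ∀ x ∈ (buildArr pred nums).1, x ∈ nums := by
  intro x hx
  unfold buildArr at hx
  rcases buildAux_mem pred nums ([], [], 1) x hx with h | h
  · simp at h
  · exact h

lemma isP_agree (x : Int) (h0 : 0 ≤ x) (h1 : x ≤ 50000) : isPA x = isPB x := by
  rw [isPA, if_pos h0, isPB,
    show decide (0 ≤ x ∧ x < 50001) = true by rw [decide_eq_true_eq]; exact ⟨h0, by omega⟩,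
    Bool.true_and]

lemma buildArr_congr (nums : List Int) (hpre : ∀ x ∈ nums, 0 ≤ x ∧ x ≤ 50000) :
    buildArr isPA nums = buildArr isPB nums := by
  have key : nums.foldl (fun (s : List Int × List Int × Int) num =>
        if isPA num then (s.1 ++ [num], s.2.1 ++ [s.2.2], 1)
        else (s.1, s.2.1, s.2.2 + 1)) ([], [], 1)
      = nums.foldl (fun (s : List Int × List Int × Int) num =>
        if isPB num then (s.1 ++ [num], s.2.1 ++ [s.2.2], 1)
        else (s.1, s.2.1, s.2.2 + 1)) ([], [], 1) := by
    apply PySem.List.foldl_congr_mem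
    intro acc x hx
    obtain ⟨h0, h1⟩ := hpre x hx
    rw [isP_agree x h0 h1]
  unfold buildArr
  rw [key]

lemma ports_eq_res (pred : Int → Bool) (nums : List Int) (k : Int)
    (hpre : ∀ x ∈ nums, 0 ≤ x ∧ x ≤ 50000) :
    ((List.range (buildArr pred nums).1.length).foldl
        (stepA (buildArr pred nums).1 (buildArr pred nums).2 k) ⟨pvINF, 0, -1, -1, 0, 0⟩).res
      = RESV (buildArr pred nums).1 (buildArr pred nums).2 k (buildArr pred nums).1.length := by
  have hbound : ∀ i, 0 ≤ fA (buildArr pred nums).1 i ∧ fA (buildArr pred nums).1 i ≤ 50000 := by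
    intro i
    unfold fA
    rcases Nat.lt_or_ge i (buildArr pred nums).1.length with hi | hi
    · rw [List.getD_eq_getElem _ 0 hi]
      exact ⟨(hpre _ (buildArr_mem pred nums _ (List.getElem_mem hi))).1,
        (hpre _ (buildArr_mem pred nums _ (List.getElem_mem hi))).2⟩
    · rw [List.getD_eq_default _ 0 hi]
      exact ⟨le_rfl, by norm_num⟩
  have hPos : ∀ i, 0 ≤ fA (buildArr pred nums).1 i := fun i => (hbound i).1
  have hInf : ∀ i, fA (buildArr pred nums).1 i < pvINF := by
    intro i
    have := (hbound i).2
    unfold pvINF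
    omega
  rcases Nat.eq_zero_or_pos (buildArr pred nums).1.length with hz | hpos
  · rw [hz]
    simp [RESV]
  · exact (foldA_eq (buildArr pred nums).1 (buildArr pred nums).2 k hPos hInf
      (buildArr_len pred nums) _ hpos le_rfl).2

-- ===== VERDICT (by name: the statement is the Claim_ definition above) =====
theorem primeSubarray_spec : Claim_equal_primeSubarray := by
  intro nums k _ hpre
  unfold Spec_primeSubarray primeSubarray primeSubarray_alt
  rw [buildArr_congr nums hpre, ports_eq_res isPB nums k hpre, foldB_eq]
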